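-- pv_equiv track=rewrite | github.com/liavtavo/calcul-concentration | calcul_concentration.py | concatenation_ind
-- ===== SOURCE A (Python) =====
-- def concatenation_ind(ch):
--     """
--     Fonction permettant de concatener les chiffres consécutifs dans une liste.
--     """
--     chiffres = '0123456789'
--     i = 1
--     while i < len(ch)-1:
--         if ch[i] in chiffres and ch[i+1] in chiffres:
--             ch[i:i+2] = [ch[i]+ch[i+1]]
--         i+=1
--     return ch
-- ===== SOURCE B (Python) =====
-- def concatenation_ind(ch):
--     """
--     Fonction permettant de concatener les chiffres consécutifs dans une liste.
--     Single left-to-right pass over the original list, merging adjacent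
--     digit-like pairs (starting from index 1, as in the original) into a
--     fresh output list, then written back into ch.
--     """
--     chiffres = '0123456789'
--     out = ch[:1]
--     j = 1
--     n = len(ch)
--     while j < n:
--         if j + 1 < n and ch[j] in chiffres and ch[j + 1] in chiffres:
--             out.append(ch[j] + ch[j + 1])
--             j += 2
--         else:
--             out.append(ch[j])
--             j += 1
--     ch[:] = out
--     return ch
-- ===== Notes on version B (the rewrite author's own statement) =====
-- stated objective: alternative
-- what changed: Replaces the while-loop that splices each merged pair back into the list it is iterating over (re-reading len(ch) as it shrinks) by a single left-to-right pass over the original list that builds a fresh output, merging adjacent digit-like pairs greedily from index 1.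
import Mathlib
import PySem

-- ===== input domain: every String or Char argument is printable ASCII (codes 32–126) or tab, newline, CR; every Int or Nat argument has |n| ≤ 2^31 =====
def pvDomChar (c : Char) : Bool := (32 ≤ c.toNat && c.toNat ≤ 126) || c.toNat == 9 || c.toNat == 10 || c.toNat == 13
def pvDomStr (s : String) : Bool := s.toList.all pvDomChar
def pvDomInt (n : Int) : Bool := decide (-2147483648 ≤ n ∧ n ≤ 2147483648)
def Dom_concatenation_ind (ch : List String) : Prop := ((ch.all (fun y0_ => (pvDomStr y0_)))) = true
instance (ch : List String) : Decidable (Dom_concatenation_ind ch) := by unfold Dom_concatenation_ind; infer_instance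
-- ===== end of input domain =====

-- B replaces A's splice-back while-loop (which edits the list it iterates over) by one pass over
-- the original list building the output once;
-- both Pythons mutate ch in place and return it — the equivalence proved here is about the return value.

-- ===== PORT A =====
-- A's while loop: i counts up, the list shrinks by one at each merge (the slice
-- assignment ch[i:i+2] = [ch[i]+ch[i+1]] is take i ++ [merged] ++ drop (i+2));
-- 'x in chiffres' is Python's substring test, PySem.Str.isIn.
-- Indices i and i+1 are nonnegative and in range under the guard, so getD is exact here.
def pvLoopA (ch : List String) (i : Nat) : List String :=
  if i < ch.length - 1 then
    if PySem.Str.isIn (ch.getD i "") "0123456789" && PySem.Str.isIn (ch.getD (i+1) "") "0123456789" then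
      pvLoopA (ch.take i ++ [ch.getD i "" ++ ch.getD (i+1) ""] ++ ch.drop (i+2)) (i+1)
    else
      pvLoopA ch (i+1)
  else ch
termination_by ch.length - i
decreasing_by
  · simp only [List.length_append, List.length_take, List.length_drop, List.length_cons,
      List.length_nil]
    omega
  · omega

def concatenation_ind (ch : List String) : List String := pvLoopA ch 1

-- ===== PORT B =====
-- B's while loop: j walks the ORIGINAL list, emitting one output element per step
-- (a merged pair, advancing by 2, or a single element, advancing by 1);
-- the out.append accumulation is rendered as the cons the recursion returns.
def pvLoopB (ch : List String) (j : Nat) : List String :=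
  if j < ch.length then
    if (decide (j + 1 < ch.length)) && PySem.Str.isIn (ch.getD j "") "0123456789" && PySem.Str.isIn (ch.getD (j+1) "") "0123456789" then
      (ch.getD j "" ++ ch.getD (j+1) "") :: pvLoopB ch (j+2)
    else
      ch.getD j "" :: pvLoopB ch (j+1)
  else []
termination_by ch.length - j

def concatenation_ind_alt (ch : List String) : List String := ch.take 1 ++ pvLoopB ch 1

-- ===== PRECONDITION & SPEC =====
def Spec_concatenation_ind (ch : List String) (out : List String) : Prop := out = concatenation_ind_alt ch
instance (ch : List String) (out : List String) : Decidable (Spec_concatenation_ind ch out) := by unfold Spec_concatenation_ind; infer_instance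

-- ===== CLAIM (what is proved, stated in full; the proofs are below) =====
def Claim_equal_concatenation_ind : Prop := ∀ (ch : List String), Dom_concatenation_ind ch → Spec_concatenation_ind ch (concatenation_ind ch)

-- ===== LEMMAS AND PROOFS =====

-- The common mathematical core both loops compute on the tail: greedy pairwise merge.
def pvMerge : List String → List String
  | [] => []
  | [x] => [x]
  | x :: y :: r =>
    if PySem.Str.isIn x "0123456789" && PySem.Str.isIn y "0123456789" then
      (x ++ y) :: pvMerge r
    else
      x :: pvMerge (y :: r)

lemma pvDropCons (ch : List String) (j : Nat) (h : j < ch.length) :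
    ch.drop j = ch.getD j "" :: ch.drop (j+1) := by
  rw [List.drop_eq_getElem_cons h]
  simp [List.getD_eq_getElem?_getD, h]

lemma pvMerge_short (l : List String) (h : l.length ≤ 1) : pvMerge l = l := by
  match l, h with
  | [], _ => rfl
  | [x], _ => rfl

lemma pvLoopB_eq (ch : List String) (j : Nat) : pvLoopB ch j = pvMerge (ch.drop j) := by
  induction j using pvLoopB.induct (ch := ch) with
  | case1 j hj hd ih =>
    rcases Bool.and_eq_true_iff.1 hd with ⟨hd1, hB⟩
    rcases Bool.and_eq_true_iff.1 hd1 with ⟨h1d, hA⟩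
    have h1 : j + 1 < ch.length := of_decide_eq_true h1d
    rw [pvLoopB, if_pos hj, if_pos hd, ih, pvDropCons ch j hj, pvDropCons ch (j+1) h1,
      pvMerge, if_pos (Bool.and_eq_true_iff.2 ⟨hA, hB⟩)]
  | case2 j hj hd ih =>
    rw [pvLoopB, if_pos hj, if_neg hd, ih]
    by_cases h1 : j + 1 < ch.length
    · have hd2 : ¬(PySem.Str.isIn (ch.getD j "") "0123456789" &&
          PySem.Str.isIn (ch.getD (j+1) "") "0123456789") = true := by
        intro hAB
        rcases Bool.and_eq_true_iff.1 hAB with ⟨hA, hB⟩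
        exact hd (Bool.and_eq_true_iff.2 ⟨Bool.and_eq_true_iff.2 ⟨decide_eq_true h1, hA⟩, hB⟩)
      rw [pvDropCons ch j hj, pvDropCons ch (j+1) h1, pvMerge, if_neg hd2]
    · have h2 : ch.length ≤ j + 1 := by omega
      rw [List.drop_eq_nil_of_le h2, pvDropCons ch j hj, List.drop_eq_nil_of_le h2]
      rfl
  | case3 j hj =>
    rw [pvLoopB, if_neg hj, List.drop_eq_nil_of_le (by omega)]
    rfl

lemma pvLoopA_eq (ch : List String) (i : Nat) :
    pvLoopA ch i = ch.take i ++ pvMerge (ch.drop i) := by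
  induction ch, i using pvLoopA.induct with
  | case1 ch i hi hd ih =>
    have h1 : i + 1 < ch.length := by omega
    have hlen : (ch.take i ++ [ch.getD i "" ++ ch.getD (i+1) ""]).length = i + 1 := by
      simp only [List.length_append, List.length_take, List.length_cons, List.length_nil]
      omega
    rw [pvLoopA, if_pos hi, if_pos hd, ih, List.take_left' hlen, List.drop_left' hlen,
      pvDropCons ch i (by omega), pvDropCons ch (i+1) h1, pvMerge, if_pos hd]
    simp [List.append_assoc]
  | case2 ch i hi hd ih =>
    have h1 : i + 1 < ch.length := by omega
    rw [pvLoopA, if_pos hi, if_neg hd, ih,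
      pvDropCons ch i (by omega), pvDropCons ch (i+1) h1, pvMerge, if_neg hd]
    simp only [List.getD_eq_getElem?_getD, List.getElem?_eq_getElem (Nat.lt_of_succ_lt h1),
      Option.getD_some]
    rw [List.take_succ_eq_append_getElem (Nat.lt_of_succ_lt h1), List.append_assoc,
      List.singleton_append]
  | case3 ch i hi =>
    rw [pvLoopA, if_neg hi, pvMerge_short _ (by simp [List.length_drop]; omega),
      List.take_append_drop]

-- ===== VERDICT (by name: the statement is the Claim_ definition above) =====
theorem concatenation_ind_spec : Claim_equal_concatenation_ind := by
  intro ch _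
  unfold Spec_concatenation_ind concatenation_ind concatenation_ind_alt
  rw [pvLoopA_eq, pvLoopB_eq]
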